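-- pv_equiv track=rewrite | github.com/legeana/config | apps/git/git-signing-key.py | line_fields
-- ===== SOURCE A (Python) =====
-- def line_fields(line: str, a: int, b: int) -> tuple[str, str]:
--     split = line.strip().split()
--     a_s = None
--     b_s = None
--     for i, part in enumerate(split):
--         if i == a:
--             a_s = part
--         if i == b:
--             b_s = part
--         if a_s is not None and b_s is not None:
--             return (a_s, b_s)
--     raise IndexError(f"{line!r} does not contain fields {a} and {b}")
-- ===== SOURCE B (Python) =====
-- def line_fields(line: str, a: int, b: int) -> tuple[str, str]:
--     split = line.strip().split()
--     if 0 <= a < len(split) and 0 <= b < len(split):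
--         return (split[a], split[b])
--     raise IndexError(f"{line!r} does not contain fields {a} and {b}")
-- ===== Notes on version B (the rewrite author's own statement) =====
-- stated objective: simpler
-- what changed: Replaces the enumerate-scan that collects the two fields with a single bounds check followed by direct O(1) indexing into the split list.
import Mathlib
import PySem

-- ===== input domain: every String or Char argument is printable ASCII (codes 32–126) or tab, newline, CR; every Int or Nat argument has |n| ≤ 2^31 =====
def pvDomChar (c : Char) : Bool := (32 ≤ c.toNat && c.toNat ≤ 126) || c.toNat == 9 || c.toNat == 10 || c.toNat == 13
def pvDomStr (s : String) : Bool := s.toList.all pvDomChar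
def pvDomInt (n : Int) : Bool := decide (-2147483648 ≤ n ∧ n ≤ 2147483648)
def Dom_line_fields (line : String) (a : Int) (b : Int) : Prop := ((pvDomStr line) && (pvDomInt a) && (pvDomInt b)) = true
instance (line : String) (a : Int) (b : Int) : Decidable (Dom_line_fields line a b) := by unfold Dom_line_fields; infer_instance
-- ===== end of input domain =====

-- B replaces A's enumerate-scan accumulating the two fields with a bounds check and direct indexing (objective: simpler).
-- ===== PORT A =====
-- A's for-loop over enumerate(split) with the two Option accumulators and the early return; none = the final raise.
def lfLoop : List String → Int → Int → Int → Option String → Option String → Option (String × String)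
  | [], _, _, _, _, _ => none
  | p :: rest, i, a, b, oa, ob =>
    let oa' := if i = a then some p else oa
    let ob' := if i = b then some p else ob
    match oa', ob' with
    | some x, some y => some (x, y)
    | oa', ob' => lfLoop rest (i + 1) a b oa' ob'

-- Pre_ excludes the raising inputs, so the .getD default is never reached there.
def line_fields (line : String) (a : Int) (b : Int) : String × String :=
  let split := PySem.Str.split₀ (PySem.Str.strip line)
  (lfLoop split 0 a b none none).getD ("", "")

-- ===== PORT B =====
def line_fields_alt (line : String) (a : Int) (b : Int) : String × String :=
  let split := PySem.Str.split₀ (PySem.Str.strip line)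
  if 0 ≤ a ∧ a < split.length ∧ 0 ≤ b ∧ b < split.length then
    ((PySem.List.pyGet? split a).getD "", (PySem.List.pyGet? split b).getD "")
  else ("", "")  -- B raises IndexError here; excluded by Pre_

-- ===== PRECONDITION & SPEC =====
-- Pre_ admits exactly the inputs on which A returns (both field indices in range); on the rest A raises IndexError.
def Pre_line_fields (line : String) (a : Int) (b : Int) : Prop :=
  let split := PySem.Str.split₀ (PySem.Str.strip line)
  0 ≤ a ∧ a < split.length ∧ 0 ≤ b ∧ b < split.length
instance (line : String) (a : Int) (b : Int) : Decidable (Pre_line_fields line a b) := by unfold Pre_line_fields; infer_instance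
def pvWitness_line_fields : String × Int × Int := (" a b  c ", 1, 0)

def Spec_line_fields (line : String) (a : Int) (b : Int) (out : String × String) : Prop := out = line_fields_alt line a b
instance (line : String) (a : Int) (b : Int) (out : String × String) : Decidable (Spec_line_fields line a b out) := by unfold Spec_line_fields; infer_instance

-- ===== CLAIM (what is proved, stated in full; the proofs are below) =====
def Claim_equal_line_fields : Prop := ∀ (line : String) (a : Int) (b : Int), Dom_line_fields line a b → Pre_line_fields line a b → Spec_line_fields line a b (line_fields line a b)

-- ===== LEMMAS AND PROOFS =====

-- Invariant proof for A's loop: with the accumulators describing the already-passed prefix,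
-- the loop returns exactly the two in-range fields.
lemma lfLoop_spec (l : List String) : ∀ (i a b : Int) (oa ob : Option String) (xa xb : String),
    (a < i → oa = some xa) → (i ≤ a → oa = none ∧ l[(a - i).toNat]? = some xa) →
    (b < i → ob = some xb) → (i ≤ b → ob = none ∧ l[(b - i).toNat]? = some xb) →
    (oa = none ∨ ob = none) →
    lfLoop l i a b oa ob = some (xa, xb) := by
  induction l with
  | nil =>
    intro i a b oa ob xa xb ha1 ha2 hb1 hb2 hne
    rcases (by omega : i ≤ a ∨ a < i) with h | h
    · exact absurd (ha2 h).2 (by simp)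
    rcases (by omega : i ≤ b ∨ b < i) with h' | h'
    · exact absurd (hb2 h').2 (by simp)
    · rcases hne with hh | hh
      · rw [ha1 h] at hh; simp at hh
      · rw [hb1 h'] at hh; simp at hh
  | cons p rest ih =>
    intro i a b oa ob xa xb ha1 ha2 hb1 hb2 hne
    have hstepa : ((if i = a then some p else oa) = some xa ∧ a ≤ i) ∨
        ((if i = a then some p else oa) = none ∧ a > i ∧ rest[(a - (i+1)).toNat]? = some xa) := by
      rcases lt_trichotomy a i with h | h | h
      · exact Or.inl ⟨by simp [show ¬ i = a by omega, ha1 h], le_of_lt h⟩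
      · left
        obtain ⟨-, hg⟩ := ha2 (le_of_eq h.symm)
        simp [show (a - i).toNat = 0 by omega] at hg
        exact ⟨by simp [h, hg], le_of_eq h⟩
      · right
        obtain ⟨hn, hg⟩ := ha2 (le_of_lt h)
        refine ⟨by simp [show ¬ i = a by omega, hn], h, ?_⟩
        have : (a - i).toNat = (a - (i+1)).toNat + 1 := by omega
        rw [this] at hg
        simpa using hg
    have hstepb : ((if i = b then some p else ob) = some xb ∧ b ≤ i) ∨
        ((if i = b then some p else ob) = none ∧ b > i ∧ rest[(b - (i+1)).toNat]? = some xb) := by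
      rcases lt_trichotomy b i with h | h | h
      · exact Or.inl ⟨by simp [show ¬ i = b by omega, hb1 h], le_of_lt h⟩
      · left
        obtain ⟨-, hg⟩ := hb2 (le_of_eq h.symm)
        simp [show (b - i).toNat = 0 by omega] at hg
        exact ⟨by simp [h, hg], le_of_eq h⟩
      · right
        obtain ⟨hn, hg⟩ := hb2 (le_of_lt h)
        refine ⟨by simp [show ¬ i = b by omega, hn], h, ?_⟩
        have : (b - i).toNat = (b - (i+1)).toNat + 1 := by omega
        rw [this] at hg
        simpa using hg
    rw [lfLoop]
    rcases hstepa with ⟨hA, hAle⟩ | ⟨hA, hAi, hAg⟩ <;> rcases hstepb with ⟨hB, hBle⟩ | ⟨hB, hBi, hBg⟩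
    · simp only [hA, hB]
    · simp only [hA, hB]
      exact ih (i+1) a b _ _ xa xb (fun _ => rfl) (fun h => absurd h (by omega)) (fun h => absurd h (by omega)) (fun _ => ⟨rfl, hBg⟩) (Or.inr rfl)
    · simp only [hA, hB]
      exact ih (i+1) a b _ _ xa xb (fun h => absurd h (by omega)) (fun _ => ⟨rfl, hAg⟩) (fun _ => rfl) (fun h => absurd h (by omega)) (Or.inl rfl)
    · simp only [hA, hB]
      exact ih (i+1) a b _ _ xa xb (fun h => absurd h (by omega)) (fun _ => ⟨rfl, hAg⟩) (fun h => absurd h (by omega)) (fun _ => ⟨rfl, hBg⟩) (Or.inl rfl)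

-- ===== VERDICT (by name: the statement is the Claim_ definition above) =====
theorem line_fields_spec : Claim_equal_line_fields := by
  intro line a b _ hpre
  unfold Pre_line_fields at hpre
  obtain ⟨ha0, haL, hb0, hbL⟩ := hpre
  unfold Spec_line_fields
  show (lfLoop (PySem.Str.split₀ (PySem.Str.strip line)) 0 a b none none).getD ("", "") =
    (if 0 ≤ a ∧ a < ((PySem.Str.split₀ (PySem.Str.strip line)).length : Int) ∧ 0 ≤ b ∧
        b < ((PySem.Str.split₀ (PySem.Str.strip line)).length : Int) then
      ((PySem.List.pyGet? (PySem.Str.split₀ (PySem.Str.strip line)) a).getD "",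
       (PySem.List.pyGet? (PySem.Str.split₀ (PySem.Str.strip line)) b).getD "")
    else ("", ""))
  set sp := PySem.Str.split₀ (PySem.Str.strip line) with hs
  have haL' : a.toNat < sp.length := by omega
  have hbL' : b.toNat < sp.length := by omega
  have key := lfLoop_spec sp 0 a b none none (sp[a.toNat]) (sp[b.toNat])
    (fun h => absurd h (by omega))
    (fun _ => ⟨rfl, by simp [List.getElem?_eq_getElem haL']⟩)
    (fun h => absurd h (by omega))
    (fun _ => ⟨rfl, by simp [List.getElem?_eq_getElem hbL']⟩)
    (Or.inl rfl)
  rw [key, if_pos (⟨ha0, haL, hb0, hbL⟩ : _ ∧ _ ∧ _ ∧ _)]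
  simp [PySem.List.pyGet?_of_nonneg sp ha0, PySem.List.pyGet?_of_nonneg sp hb0, haL', hbL']
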